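-- pv_equiv track=rewrite | github.com/Dev1nbo0ker/AI_search | puzzle.py | apply_moves
-- ===== SOURCE A (Python) =====
-- from typing import Callable, Optional
--
-- State = tuple[int, ...]
--
-- Move = str
--
-- N = 4
--
-- def get_neighbors(state: State) -> list[tuple[Move, State]]:
--     """Generate neighbor states in U, D, L, R order."""
--     blank = state.index(0)
--     r, c = divmod(blank, N)
--     neighbors: list[tuple[Move, State]] = []
--
--     def swapped(new_blank: int) -> State:
--         arr = list(state)
--         arr[blank], arr[new_blank] = arr[new_blank], arr[blank]
--         return tuple(arr)
--
--     if r > 0: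
--         neighbors.append(("U", swapped(blank - N)))
--     if r < N - 1:
--         neighbors.append(("D", swapped(blank + N)))
--     if c > 0:
--         neighbors.append(("L", swapped(blank - 1)))
--     if c < N - 1:
--         neighbors.append(("R", swapped(blank + 1)))
--     return neighbors
--
-- def apply_moves(state: State, moves: list[Move]) -> State:
--     """Apply a move sequence to construct test states."""
--     cur = state
--     for mv in moves:
--         next_state: Optional[State] = None
--         for move, nxt in get_neighbors(cur):
--             if move == mv:
--                 next_state = nxt
--                 break
--         if next_state is None:
--             raise ValueError(f"invalid move {mv} for state {cur}")
--         cur = next_state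
--     return cur
-- ===== SOURCE B (Python) =====
-- N = 4
--
-- _DELTAS = {"U": -N, "D": N, "L": -1, "R": 1}
--
-- def _swapped(lst, i, j):
--     out = list(lst)
--     out[i] = lst[j]
--     out[j] = lst[i]
--     return out
--
-- def apply_moves(state, moves):
--     """Apply a move sequence by computing each single swap directly."""
--     cur = list(state)
--     for mv in moves:
--         blank = cur.index(0)
--         r, c = divmod(blank, N)
--         delta = _DELTAS.get(mv)
--         if delta is None or (mv == "U" and r == 0) or (mv == "D" and r == N - 1) \
--                 or (mv == "L" and c == 0) or (mv == "R" and c == N - 1):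
--             raise ValueError(f"invalid move {mv} for state {tuple(cur)}")
--         cur = _swapped(cur, blank, blank + delta)
--     return tuple(cur)
-- ===== Notes on version B (the rewrite author's own statement) =====
-- stated objective: simpler
-- what changed: Each move is applied by looking up its blank offset in a dict and performing the single required swap directly, instead of generating all four neighbor states and linearly searching them for the matching move letter.
import Mathlib
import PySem

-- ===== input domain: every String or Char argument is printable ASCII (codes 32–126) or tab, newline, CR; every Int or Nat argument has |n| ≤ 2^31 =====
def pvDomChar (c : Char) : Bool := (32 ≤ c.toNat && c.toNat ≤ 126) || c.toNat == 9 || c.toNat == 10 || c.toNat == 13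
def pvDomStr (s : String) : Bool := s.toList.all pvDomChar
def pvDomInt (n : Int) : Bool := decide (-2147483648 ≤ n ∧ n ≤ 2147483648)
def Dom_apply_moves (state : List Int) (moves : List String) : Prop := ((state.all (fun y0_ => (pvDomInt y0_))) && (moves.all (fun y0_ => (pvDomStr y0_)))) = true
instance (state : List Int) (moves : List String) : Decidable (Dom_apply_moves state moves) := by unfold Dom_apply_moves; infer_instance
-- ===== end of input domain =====

-- B replaces A's build-all-four-neighbors-then-linear-search step by a move→offset table and one
-- direct swap per move (simpler per-move work); equivalence is about the return value (neither
-- program mutates its arguments observably).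

-- ===== PORT A =====
def pvSwappedA (state : List Int) (blank nb : Int) : Option (List Int) := do
  let a ← PySem.List.pyGet? state nb
  let b ← PySem.List.pyGet? state blank
  let s1 ← PySem.List.pySet? state blank a
  PySem.List.pySet? s1 nb b

def pvGetNeighbors (state : List Int) : Option (List (String × List Int)) :=
  match PySem.List.index? state 0 with
  | none => none
  | some blankN =>
    let blank : Int := blankN
    let r := PySem.Int.floordiv blank 4
    let c := PySem.Int.mod blank 4
    let step (acc : List (String × List Int)) (cond : Bool) (mv : String) (nb : Int) :
        Option (List (String × List Int)) :=
      if cond then (pvSwappedA state blank nb).map (fun s => acc ++ [(mv, s)]) else some acc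
    do
      let a1 ← step [] (decide (r > 0)) "U" (blank - 4)
      let a2 ← step a1 (decide (r < 3)) "D" (blank + 4)
      let a3 ← step a2 (decide (c > 0)) "L" (blank - 1)
      step a3 (decide (c < 3)) "R" (blank + 1)

def pvGoA (cur : List Int) (moves : List String) : Option (List Int) :=
  match moves with
  | [] => some cur
  | mv :: rest =>
    match pvGetNeighbors cur with
    | none => none
    | some nbrs =>
      match nbrs.find? (fun p => p.1 == mv) with
      | none => none
      | some p => pvGoA p.2 rest

def apply_moves (state : List Int) (moves : List String) : List Int :=
  (pvGoA state moves).getD []   -- the getD is dead under Pre_: A raises exactly where pvGoA is none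

-- ===== PORT B =====
def pvDeltas : PySem.Dict String Int := PySem.Dict.ofList [("U", -4), ("D", 4), ("L", -1), ("R", 1)]

-- out = list(lst); out[i] = lst[j]; out[j] = lst[i]
def pvSwapB (cur : List Int) (i j : Int) : Option (List Int) := do
  let a ← PySem.List.pyGet? cur j
  let out1 ← PySem.List.pySet? cur i a
  let b ← PySem.List.pyGet? cur i
  PySem.List.pySet? out1 j b

def pvGoB (cur : List Int) (moves : List String) : Option (List Int) :=
  match moves with
  | [] => some cur
  | mv :: rest =>
    match PySem.List.index? cur 0 with
    | none => none
    | some blankN =>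
      let blank : Int := blankN
      let r := PySem.Int.floordiv blank 4
      let c := PySem.Int.mod blank 4
      match PySem.Dict.get? pvDeltas mv with
      | none => none
      | some delta =>
        if (mv == "U" && r == 0) || (mv == "D" && r == 3) ||
           (mv == "L" && c == 0) || (mv == "R" && c == 3) then
          none
        else
          match pvSwapB cur blank (blank + delta) with
          | none => none
          | some s2 => pvGoB s2 rest

def apply_moves_alt (state : List Int) (moves : List String) : List Int :=
  (pvGoB state moves).getD []   -- the getD is dead under Pre_: B raises only outside Pre_

-- ===== PRECONDITION & SPEC =====
def pvSwapNat (cur : List Int) (i j : Nat) : List Int :=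
  (cur.set i (cur.getD j 0)).set j (cur.getD i 0)

def pvValid (cur : List Int) (moves : List String) : Bool :=
  match moves with
  | [] => true
  | mv :: rest =>
    match PySem.List.index? cur 0 with
    | none => false
    | some blank =>
      let n := cur.length
      let r := blank / 4
      let c := blank % 4
      if (r < 3 ∧ n ≤ blank + 4) ∨ (c < 3 ∧ n ≤ blank + 1) then false
      else if mv = "U" ∧ 0 < r then pvValid (pvSwapNat cur blank (blank - 4)) rest
      else if mv = "D" ∧ r < 3 then pvValid (pvSwapNat cur blank (blank + 4)) rest
      else if mv = "L" ∧ 0 < c then pvValid (pvSwapNat cur blank (blank - 1)) rest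
      else if mv = "R" ∧ c < 3 then pvValid (pvSwapNat cur blank (blank + 1)) rest
      else false


-- Pre_: exactly the inputs on which the Python A returns normally: at every step the current
-- state contains a 0, get_neighbors can build every enabled neighbor without an IndexError
-- (automatic for length-16 states), and the requested move is one of the enabled U/D/L/R.
def Pre_apply_moves (state : List Int) (moves : List String) : Prop :=
  pvValid state moves = true
instance (state : List Int) (moves : List String) : Decidable (Pre_apply_moves state moves) := by
  unfold Pre_apply_moves; infer_instance

def pvWitness_apply_moves : List Int × List String :=
  ([1, 0, 2, 3, 4, 5, 6, 7, 8, 9, 10, 11, 12, 13, 14, 15], ["D", "R", "U", "L"])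

def Spec_apply_moves (state : List Int) (moves : List String) (out : List Int) : Prop := out = apply_moves_alt state moves
instance (state : List Int) (moves : List String) (out : List Int) : Decidable (Spec_apply_moves state moves out) := by unfold Spec_apply_moves; infer_instance

-- ===== CLAIM (what is proved, stated in full; the proofs are below) =====
def Claim_equal_apply_moves : Prop := ∀ (state : List Int) (moves : List String), Dom_apply_moves state moves → Pre_apply_moves state moves → Spec_apply_moves state moves (apply_moves state moves)

-- ===== LEMMAS AND PROOFS =====
theorem pvSwappedA_eq (cur : List Int) (i j : Nat) (hi : i < cur.length) (hj : j < cur.length) :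
    pvSwappedA cur (i : Int) (j : Int) = some (pvSwapNat cur i j) := by
  have hj2 : j < (cur.set i (cur[j]'hj)).length := by simpa using hj
  simp [pvSwappedA, pvSwapNat, PySem.List.pyGet?_natCast, List.getElem?_eq_getElem hi,
    List.getElem?_eq_getElem hj, PySem.List.pySet?_natCast _ _ _ hi,
    PySem.List.pySet?_natCast _ _ _ hj2, List.getD]

theorem pvSwapB_eq (cur : List Int) (i j : Nat) (hi : i < cur.length) (hj : j < cur.length) :
    pvSwapB cur (i : Int) (j : Int) = some (pvSwapNat cur i j) := by
  have hj2 : j < (cur.set i (cur[j]'hj)).length := by simpa using hj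
  simp [pvSwapB, pvSwapNat, PySem.List.pyGet?_natCast, List.getElem?_eq_getElem hi,
    List.getElem?_eq_getElem hj, PySem.List.pySet?_natCast _ _ _ hi,
    PySem.List.pySet?_natCast _ _ _ hj2, List.getD]

theorem pvGoAB (moves : List String) : ∀ (cur : List Int), pvValid cur moves = true →
    pvGoA cur moves = pvGoB cur moves := by
  induction moves with
  | nil => intro cur _; rfl
  | cons mv rest ih =>
    intro cur hv
    unfold pvValid at hv
    cases hidx : PySem.List.index? cur 0 with
    | none => rw [hidx] at hv; exact absurd hv (by simp)
    | some blank =>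
      rw [hidx] at hv
      simp only at hv
      split at hv
      · exact absurd hv (by simp)
      rename_i hnb
      have hD : blank / 4 < 3 → blank + 4 < cur.length := by
        intro h; by_contra h2; exact hnb (Or.inl ⟨h, by omega⟩)
      have hR : blank % 4 < 3 → blank + 1 < cur.length := by
        intro h; by_contra h2; exact hnb (Or.inr ⟨h, by omega⟩)
      have hidx2 : List.idxOf? 0 cur = some blank := by simpa using hidx
      have hfd : PySem.Int.floordiv (blank : Int) 4 = ((blank / 4 : Nat) : Int) := by
        exact_mod_cast PySem.Int.floordiv_natCast blank 4
      have hmd : PySem.Int.mod (blank : Int) 4 = ((blank % 4 : Nat) : Int) := by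
        exact_mod_cast PySem.Int.mod_natCast blank 4
      have hblank : blank < cur.length := by
        obtain ⟨hk, _, _⟩ := PySem.List.getElem_of_index?_eq_some hidx
        exact hk
      have i1 : ((0:Int) < (blank:Int) / 4) ↔ (0 < blank / 4) := by omega
      have i2 : ((blank:Int) / 4 < 3) ↔ (blank / 4 < 3) := by omega
      have i3 : ((0:Int) < (blank:Int) % 4) ↔ (0 < blank % 4) := by omega
      have i4 : ((blank:Int) % 4 < 3) ↔ (blank % 4 < 3) := by omega
      have i5 : ((blank:Int) / 4 = 0) ↔ (blank / 4 = 0) := by omega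
      have i6 : ((blank:Int) / 4 = 3) ↔ (blank / 4 = 3) := by omega
      have i7 : ((blank:Int) % 4 = 0) ↔ (blank % 4 = 0) := by omega
      have i8 : ((blank:Int) % 4 = 3) ↔ (blank % 4 = 3) := by omega
      have eU : 0 < blank / 4 →
          pvSwappedA cur (blank : Int) ((blank : Int) - 4) = some (pvSwapNat cur blank (blank - 4)) := by
        intro h
        rw [(by omega : (blank : Int) - 4 = ((blank - 4 : Nat) : Int))]
        exact pvSwappedA_eq _ _ _ hblank (by omega)
      have eD : blank / 4 < 3 →
          pvSwappedA cur (blank : Int) ((blank : Int) + 4) = some (pvSwapNat cur blank (blank + 4)) := by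
        intro h
        rw [(by omega : (blank : Int) + 4 = ((blank + 4 : Nat) : Int))]
        exact pvSwappedA_eq _ _ _ hblank (hD h)
      have eL : 0 < blank % 4 →
          pvSwappedA cur (blank : Int) ((blank : Int) - 1) = some (pvSwapNat cur blank (blank - 1)) := by
        intro h
        rw [(by omega : (blank : Int) - 1 = ((blank - 1 : Nat) : Int))]
        exact pvSwappedA_eq _ _ _ hblank (by omega)
      have eR : blank % 4 < 3 →
          pvSwappedA cur (blank : Int) ((blank : Int) + 1) = some (pvSwapNat cur blank (blank + 1)) := by
        intro h
        rw [(by omega : (blank : Int) + 1 = ((blank + 1 : Nat) : Int))]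
        exact pvSwappedA_eq _ _ _ hblank (hR h)
      by_cases hcU : mv = "U" ∧ 0 < blank / 4
      · rw [if_pos hcU] at hv
        obtain ⟨hmv, hc⟩ := hcU; subst hmv
        have hrec := ih _ hv
        have hc2 : blank / 4 ≠ 0 := by omega
        have eS : pvSwapB cur (blank : Int) ((blank : Int) + -4) = some (pvSwapNat cur blank (blank - 4)) := by
          rw [(by omega : ((blank : Int) + -4) = (((blank - 4 : Nat)) : Int))]
          exact pvSwapB_eq _ _ _ hblank (by omega)
        have hget : PySem.Dict.get? pvDeltas "U" = some (-4) := rfl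
        by_cases h1 : 0 < blank / 4 <;> by_cases h2 : blank / 4 < 3 <;>
            by_cases h3 : 0 < blank % 4 <;> by_cases h4 : blank % 4 < 3 <;>
          first
          | omega
          | simp [pvGoA, pvGoB, pvGetNeighbors, hidx2, hfd, hmd, h1, h2, h3, h4, hc, hc2, i1, i2,
              i3, i4, i5, i6, i7, i8, eU, eD, eL, eR, eS, hget, hrec]
      rw [if_neg hcU] at hv
      by_cases hcD : mv = "D" ∧ blank / 4 < 3
      · rw [if_pos hcD] at hv
        obtain ⟨hmv, hc⟩ := hcD; subst hmv
        have hrec := ih _ hv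
        have hc2 : blank / 4 ≠ 3 := by omega
        have eS : pvSwapB cur (blank : Int) ((blank : Int) + 4) = some (pvSwapNat cur blank (blank + 4)) := by
          rw [(by omega : ((blank : Int) + 4) = (((blank + 4 : Nat)) : Int))]
          exact pvSwapB_eq _ _ _ hblank (by exact hD hc)
        have hget : PySem.Dict.get? pvDeltas "D" = some (4) := rfl
        by_cases h1 : 0 < blank / 4 <;> by_cases h2 : blank / 4 < 3 <;>
            by_cases h3 : 0 < blank % 4 <;> by_cases h4 : blank % 4 < 3 <;>
          first
          | omega
          | simp [pvGoA, pvGoB, pvGetNeighbors, hidx2, hfd, hmd, h1, h2, h3, h4, hc, hc2, i1, i2,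
              i3, i4, i5, i6, i7, i8, eU, eD, eL, eR, eS, hget, hrec]
      rw [if_neg hcD] at hv
      by_cases hcL : mv = "L" ∧ 0 < blank % 4
      · rw [if_pos hcL] at hv
        obtain ⟨hmv, hc⟩ := hcL; subst hmv
        have hrec := ih _ hv
        have hc2 : blank % 4 ≠ 0 := by omega
        have eS : pvSwapB cur (blank : Int) ((blank : Int) + -1) = some (pvSwapNat cur blank (blank - 1)) := by
          rw [(by omega : ((blank : Int) + -1) = (((blank - 1 : Nat)) : Int))]
          exact pvSwapB_eq _ _ _ hblank (by omega)
        have hget : PySem.Dict.get? pvDeltas "L" = some (-1) := rfl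
        by_cases h1 : 0 < blank / 4 <;> by_cases h2 : blank / 4 < 3 <;>
            by_cases h3 : 0 < blank % 4 <;> by_cases h4 : blank % 4 < 3 <;>
          first
          | omega
          | simp [pvGoA, pvGoB, pvGetNeighbors, hidx2, hfd, hmd, h1, h2, h3, h4, hc, hc2, i1, i2,
              i3, i4, i5, i6, i7, i8, eU, eD, eL, eR, eS, hget, hrec]
      rw [if_neg hcL] at hv
      by_cases hcR : mv = "R" ∧ blank % 4 < 3
      · rw [if_pos hcR] at hv
        obtain ⟨hmv, hc⟩ := hcR; subst hmv
        have hrec := ih _ hv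
        have hc2 : blank % 4 ≠ 3 := by omega
        have eS : pvSwapB cur (blank : Int) ((blank : Int) + 1) = some (pvSwapNat cur blank (blank + 1)) := by
          rw [(by omega : ((blank : Int) + 1) = (((blank + 1 : Nat)) : Int))]
          exact pvSwapB_eq _ _ _ hblank (by exact hR hc)
        have hget : PySem.Dict.get? pvDeltas "R" = some (1) := rfl
        by_cases h1 : 0 < blank / 4 <;> by_cases h2 : blank / 4 < 3 <;>
            by_cases h3 : 0 < blank % 4 <;> by_cases h4 : blank % 4 < 3 <;>
          first
          | omega
          | simp [pvGoA, pvGoB, pvGetNeighbors, hidx2, hfd, hmd, h1, h2, h3, h4, hc, hc2, i1, i2,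
              i3, i4, i5, i6, i7, i8, eU, eD, eL, eR, eS, hget, hrec]
      rw [if_neg hcR] at hv
      exact absurd hv (by simp)

-- ===== VERDICT (by name: the statement is the Claim_ definition above) =====
theorem apply_moves_spec : Claim_equal_apply_moves := by
  intro state moves _ hpre
  unfold Spec_apply_moves apply_moves apply_moves_alt
  rw [pvGoAB moves state hpre]
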